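-- pv_equiv track=rewrite | github.com/imnotnoahhh/vex | scripts/test_vex_macos_upstream.py | resolve_prefix_version
-- ===== SOURCE A (Python) =====
-- from typing import Dict, Iterable, List, Optional, Sequence, Tuple
--
-- class TestFailure(RuntimeError):
--     pass
--
-- def resolve_prefix_version(spec: str, versions: Iterable[str]) -> str:
--     normalized = spec.lstrip("v")
--     versions_list = list(versions)
--     if normalized in versions_list:
--         return normalized
--     prefix = normalized + "."
--     for version in versions_list:
--         if version.startswith(prefix):
--             return version
--     raise TestFailure(f"could not resolve version spec '{spec}' from upstream data")
-- ===== SOURCE B (Python) =====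
-- from typing import Iterable
--
--
-- class TestFailure(RuntimeError):
--     pass
--
--
-- def resolve_prefix_version(spec: str, versions: Iterable[str]) -> str:
--     normalized = spec.lstrip("v")
--     prefix = normalized + "."
--     found_exact = False
--     first_prefix = None
--     for version in versions:
--         if version == normalized:
--             found_exact = True
--         elif first_prefix is None and version.startswith(prefix):
--             first_prefix = version
--     if found_exact:
--         return normalized
--     if first_prefix is not None:
--         return first_prefix
--     raise TestFailure(f"could not resolve version spec '{spec}' from upstream data")
-- ===== Notes on version B (the rewrite author's own statement) =====
-- stated objective: alternative
-- what changed: A scans the list twice (membership test, then a prefix scan with early return); B makes a single pass maintaining a found_exact flag and the first prefix match, deciding after the loop.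
import Mathlib
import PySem

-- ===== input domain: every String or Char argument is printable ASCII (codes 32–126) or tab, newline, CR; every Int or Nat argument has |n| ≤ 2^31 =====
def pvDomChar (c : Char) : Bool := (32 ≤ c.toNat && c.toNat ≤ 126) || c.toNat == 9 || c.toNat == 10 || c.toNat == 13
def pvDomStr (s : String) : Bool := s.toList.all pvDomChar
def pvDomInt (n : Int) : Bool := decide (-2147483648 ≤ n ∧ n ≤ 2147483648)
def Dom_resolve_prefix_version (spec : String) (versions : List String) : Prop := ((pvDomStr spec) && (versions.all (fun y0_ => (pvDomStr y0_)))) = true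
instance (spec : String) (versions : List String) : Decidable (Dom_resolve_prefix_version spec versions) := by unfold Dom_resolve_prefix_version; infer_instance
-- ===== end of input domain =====

-- B merges A's two sequential scans (membership test, then prefix scan) into one pass keeping
-- a found_exact flag and the first prefix match; on unresolvable specs both raise TestFailure
-- (excluded by Pre_).


-- s.lstrip("v"): drop leading 'v' characters (exact: the strip set is the single char 'v')
def pyLstripV (s : String) : String := String.ofList (s.toList.dropWhile (· == 'v'))

-- ===== PORT A =====
-- the for-loop of A: return the first version starting with prefix, else raise ("" outside Pre_)
def resolveLoopA (pfx : String) : List String → String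
  | [] => ""
  | v :: rest => if PySem.Str.startswith v pfx then v else resolveLoopA pfx rest

def resolve_prefix_version (spec : String) (versions : List String) : String :=
  let normalized := pyLstripV spec
  if normalized ∈ versions then normalized
  else resolveLoopA (normalized ++ ".") versions

-- ===== PORT B =====
-- B's single pass: carry found_exact and the first prefix match; decide after the loop
def resolveLoopB (normalized pfx : String) : List String → Bool → Option String → String
  | [], foundExact, firstPrefix =>
      if foundExact then normalized
      else match firstPrefix with
        | some v => v
        | none => ""      -- A raises here; outside Pre_
  | v :: rest, foundExact, firstPrefix =>
      if v == normalized then resolveLoopB normalized pfx rest true firstPrefix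
      else if firstPrefix.isNone && PySem.Str.startswith v pfx then
        resolveLoopB normalized pfx rest foundExact (some v)
      else resolveLoopB normalized pfx rest foundExact firstPrefix

def resolve_prefix_version_alt (spec : String) (versions : List String) : String :=
  let normalized := pyLstripV spec
  resolveLoopB normalized (normalized ++ ".") versions false none

-- ===== PRECONDITION & SPEC =====
-- Pre_ excludes exactly the inputs where A (and B alike) raises TestFailure: no exact match
-- and no version starting with normalized + ".".
def Pre_resolve_prefix_version (spec : String) (versions : List String) : Prop :=
  pyLstripV spec ∈ versions ∨
    versions.any (fun v => PySem.Str.startswith v (pyLstripV spec ++ ".")) = true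
instance (spec : String) (versions : List String) : Decidable (Pre_resolve_prefix_version spec versions) := by unfold Pre_resolve_prefix_version; infer_instance

def pvWitness_resolve_prefix_version : String × List String := ("v1.2", ["1.0", "1.2.3", "1.2"])

def Spec_resolve_prefix_version (spec : String) (versions : List String) (out : String) : Prop := out = resolve_prefix_version_alt spec versions
instance (spec : String) (versions : List String) (out : String) : Decidable (Spec_resolve_prefix_version spec versions out) := by unfold Spec_resolve_prefix_version; infer_instance

-- ===== CLAIM (what is proved, stated in full; the proofs are below) =====
def Claim_equal_resolve_prefix_version : Prop := ∀ (spec : String) (versions : List String), Dom_resolve_prefix_version spec versions → Pre_resolve_prefix_version spec versions → Spec_resolve_prefix_version spec versions (resolve_prefix_version spec versions)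

-- ===== LEMMAS AND PROOFS =====

-- characterisation of B's loop: exact match (seen or still ahead) wins; otherwise the carried
-- first prefix match, then the first one ahead.
lemma resolveLoopB_eq (nm pfx : String) :
    ∀ (vs : List String) (ex : Bool) (fp : Option String),
      resolveLoopB nm pfx vs ex fp =
        if ex = true ∨ nm ∈ vs then nm
        else ((fp.or (vs.find? (fun v => PySem.Str.startswith v pfx))).getD "") := by
  intro vs
  induction vs with
  | nil =>
      intro ex fp
      cases ex <;> cases fp <;> simp [resolveLoopB]
  | cons v rest ih =>
      intro ex fp
      by_cases hv : v = nm
      · subst hv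
        simp only [resolveLoopB, beq_self_eq_true, if_true, ih]
        simp
      · have hbeq : (v == nm) = false := by simp [hv]
        simp only [resolveLoopB, hbeq, Bool.false_eq_true, if_false]
        by_cases hp : PySem.Str.startswith v pfx = true
        · have hpc : PySem.Chars.startswith v.toList pfx.toList = true := by
            simpa using hp
          cases fp with
          | none =>
              simp only [Option.isNone_none, hp, Bool.and_self, if_true, ih]
              simp [hpc, List.mem_cons, Ne.symm hv, Option.or]
          | some w =>
              simp only [Option.isNone_some, Bool.false_and, Bool.false_eq_true, if_false, ih]
              simp [List.mem_cons, Ne.symm hv, Option.or]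
        · have hpc : PySem.Chars.startswith v.toList pfx.toList = false := by
            simpa using eq_false_of_ne_true hp
          simp only [PySem.Str.startswith_eq, hpc, Bool.and_false, Bool.false_eq_true, if_false, ih]
          simp [hpc, List.mem_cons, Ne.symm hv]

-- A's for-loop is find?-then-default
lemma resolveLoopA_eq (pfx : String) (vs : List String) :
    resolveLoopA pfx vs = ((vs.find? (fun v => PySem.Str.startswith v pfx)).getD "") := by
  induction vs with
  | nil => simp [resolveLoopA]
  | cons v rest ih =>
      by_cases hp : PySem.Chars.startswith v.toList pfx.toList = true
      · simp [resolveLoopA, hp]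
      · have hpc : PySem.Chars.startswith v.toList pfx.toList = false :=
          eq_false_of_ne_true hp
        simp [resolveLoopA, hpc, ih]

-- ===== VERDICT (by name: the statement is the Claim_ definition above) =====
theorem resolve_prefix_version_spec : Claim_equal_resolve_prefix_version := by
  intro spec versions _ _
  unfold Spec_resolve_prefix_version
  by_cases hm : pyLstripV spec ∈ versions <;>
    simp [resolve_prefix_version, resolve_prefix_version_alt, resolveLoopB_eq,
      resolveLoopA_eq, hm]
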